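-- pv_equiv track=rewrite | github.com/MasterPu2020/RISCV32-Subset-CPU-for-JPEG-Encode | compiler/compile.py | while2macro
-- ===== SOURCE A (Python) =====
-- def while2macro(text:str):
--     file = text.split('\n')
--     headtotal = 0
--     endtotal = 0
--     headlevel = []
--     endlevel = []
--     for line in file:
--         if line == '':
--             continue
--         if line.split()[0] == 'while':
--             headlevel.append(headtotal - endtotal)
--             headtotal += 1
--         if line.split()[0] == 'endwhile':
--             endtotal += 1
--             endlevel.append(headtotal - endtotal)
--     assert endtotal == headtotal
--     if headtotal == 0:
--         return text
--     headcounter = [0] * (max(headlevel) + 1)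
--     endcounter = [0] * (max(endlevel) + 1)
--     headmark = []
--     endmark = []
--     for i in headlevel:
--         headmark.append('whilemark' + str(i) + '_' + str(headcounter[i]))
--         headcounter[i] += 1
--     for i in endlevel:
--         endmark.append('whilemark' + str(i) + '_' + str(endcounter[i]))
--         endcounter[i] += 1
--     text = ''
--     head_id = 0
--     end_id = 0
--     line_id = 0
--     for line in file:
--         if line == '':
--             text += '\n'
--             continue
--         if line.split()[0] == 'while':
--             line = line.replace('while ', '', 1)
--             if '<' in line:
--                 line = line.replace('<','>=', 1)
--             elif '>=' in line:
--                 line = line.replace('>=','<', 1)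
--             elif '==' in line:
--                 line = line.replace('==','!=', 1)
--             elif '!=' in line:
--                 line = line.replace('!=','==', 1)
--             else:
--                 raise [AssertionError ['while statement error: line ' + str(line_id)]]
--             line = line.replace(',', ' goto end' + headmark[head_id], 1)
--             line = 'start' + headmark[head_id] + ':\n' + line
--             assert 'goto' in line, 'while statement error: line ' + str(line_id) + '. need ,'
--             head_id += 1
--         if line.split()[0] == 'endwhile':
--             line = line.replace('endwhile', 'end' + endmark[end_id] + ':', 1)
--             line = 'x0 == x0 goto start' + endmark[end_id] + '\n' + line
--             end_id += 1
--         text += line + '\n'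
--         line_id += 1
--     return text
-- ===== SOURCE B (Python) =====
-- def _invert(cond):
--     # invert the loop condition (first comparator only)
--     if '<' in cond:
--         return cond.replace('<', '>=', 1)
--     if '>=' in cond:
--         return cond.replace('>=', '<', 1)
--     if '==' in cond:
--         return cond.replace('==', '!=', 1)
--     if '!=' in cond:
--         return cond.replace('!=', '==', 1)
--     raise ValueError('while statement without comparator')
--
-- def while2macro(text):
--     out = []
--     stack = []            # labels of currently open while loops
--     counter = {}          # level -> number of while loops seen at that level
--     seen_while = False
--     for line in text.split('\n'):
--         if line == '':
--             out.append('\n')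
--             continue
--         word = line.split()[0]
--         if word == 'while':
--             seen_while = True
--             level = len(stack)
--             label = 'whilemark' + str(level) + '_' + str(counter.get(level, 0))
--             counter[level] = counter.get(level, 0) + 1
--             stack.append(label)
--             body = _invert(line.replace('while ', '', 1))
--             body = body.replace(',', ' goto end' + label, 1)
--             assert 'goto' in body
--             line = 'start' + label + ':\n' + body
--         elif word == 'endwhile':
--             label = stack.pop()
--             line = ('x0 == x0 goto start' + label + '\n'
--                     + line.replace('endwhile', 'end' + label + ':', 1))
--         out.append(line + '\n')
--     if not seen_while:
--         return text
--     return ''.join(out)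
-- ===== Notes on version B (the rewrite author's own statement) =====
-- stated objective: simpler
-- what changed: A's three preliminary passes (count/level lists, two counter-array mark-building loops) plus an index-driven emit pass are replaced by one single traversal that pairs each endwhile with its while via an explicit stack of label strings and a per-depth counter dict, generating each label on the fly; the per-line rewrite (condition inversion, comma->goto splice) is kept byte-for-byte.
import Mathlib
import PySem

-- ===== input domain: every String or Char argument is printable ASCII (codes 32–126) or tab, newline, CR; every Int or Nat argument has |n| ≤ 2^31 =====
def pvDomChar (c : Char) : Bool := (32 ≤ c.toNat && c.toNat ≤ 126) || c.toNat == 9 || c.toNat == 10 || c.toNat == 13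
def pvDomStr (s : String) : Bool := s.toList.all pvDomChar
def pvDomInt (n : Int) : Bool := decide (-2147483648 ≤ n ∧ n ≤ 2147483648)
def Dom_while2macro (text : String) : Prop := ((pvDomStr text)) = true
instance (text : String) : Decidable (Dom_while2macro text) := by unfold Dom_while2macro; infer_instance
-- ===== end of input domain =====

-- B replaces A's three preliminary passes + index-driven emit pass by one stack-and-counter
-- traversal generating labels on the fly (objective: simpler); the per-line rewrite is unchanged.


-- ===== PORT A =====
-- shared primitive: s.replace(old, new, 1) (PySem has no count-limited replace); exact for old ≠ ""
def pvReplace1 (s old new : String) : String :=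
  let l := s.toList
  let i := PySem.Chars.find l old.toList
  if i = -1 then s
  else String.ofList (l.take i.toNat ++ new.toList ++ l.drop (i.toNat + old.toList.length))

-- shared primitive: line.split()[0]; "" where Python raises IndexError (whitespace-only line, outside Pre_)
def pvTok (line : String) : String := (PySem.Str.split₀ line).headD ""

-- 'whilemark' + str(i) + '_' + str(c)
def pvLabel (i c : Int) : String := "whilemark" ++ PySem.Int.toStr i ++ "_" ++ PySem.Int.toStr c

-- A's first loop body: state (headtotal, endtotal, headlevel, endlevel)
def pvScanA (st : Int × Int × List Int × List Int) (line : String) : Int × Int × List Int × List Int :=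
  match st with
  | (ht, et, hl, el) =>
    if line = "" then (ht, et, hl, el) else
    let w := pvTok line
    let (ht, hl) := if w = "while" then (ht + 1, hl ++ [ht - et]) else (ht, hl)
    let (et, el) := if w = "endwhile" then (et + 1, el ++ [ht - et - 1]) else (et, el)
    (ht, et, hl, el)

-- body of A's two mark-building loops (identical code, run on (headmark, headcounter) and (endmark, endcounter))
def pvMarkStep (p : List String × List Int) (i : Int) : List String × List Int :=
  (p.1 ++ [pvLabel i (PySem.List.pyGetD p.2 i 0)],
   PySem.List.pySetD p.2 i (PySem.List.pyGetD p.2 i 0 + 1))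

-- A's output loop body: state (text, head_id, end_id, line_id)
def pvEmitA (headmark endmark : List String) (st : String × Int × Int × Int) (line : String) :
    String × Int × Int × Int :=
  match st with
  | (txt, hid, eid, lid) =>
    if line = "" then (txt ++ "\n", hid, eid, lid) else
    let w := pvTok line
    let (line, hid) :=
      if w = "while" then
        let l := pvReplace1 line "while " ""
        let l :=
          if PySem.Str.isIn "<" l then pvReplace1 l "<" ">="
          else if PySem.Str.isIn ">=" l then pvReplace1 l ">=" "<"
          else if PySem.Str.isIn "==" l then pvReplace1 l "==" "!="
          else if PySem.Str.isIn "!=" l then pvReplace1 l "!=" "=="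
          else l  -- Python raises here (TypeError from `raise [AssertionError[…]]`); outside Pre_
        let mark := PySem.List.pyGetD headmark hid ""
        let l := pvReplace1 l "," (" goto end" ++ mark)
        -- (assert 'goto' in line: holds under Pre_; Python raises AssertionError outside it)
        ("start" ++ mark ++ ":\n" ++ l, hid + 1)
      else (line, hid)
    -- Python re-splits the possibly rewritten line; a rewritten while-line always starts
    -- 'start…', whose first token is never 'endwhile', so the test equals the original-token test
    let (line, eid) :=
      if w = "endwhile" then
        let mark := PySem.List.pyGetD endmark eid ""
        ("x0 == x0 goto start" ++ mark ++ "\n" ++ pvReplace1 line "endwhile" ("end" ++ mark ++ ":"),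
         eid + 1)
      else (line, eid)
    (txt ++ line ++ "\n", hid, eid, lid + 1)

def while2macro (text : String) : String :=
  let file := (PySem.Str.split? text "\n").getD []
  match file.foldl pvScanA (0, 0, [], []) with
  | (headtotal, endtotal, headlevel, endlevel) =>
    if headtotal ≠ endtotal then "" else  -- assert endtotal == headtotal; "" where Python raises (outside Pre_)
    if headtotal = 0 then text else
    let headcounter := List.replicate ((((PySem.List.max? headlevel id).getD 0)) + 1).toNat (0 : Int)
    let endcounter := List.replicate ((((PySem.List.max? endlevel id).getD 0)) + 1).toNat (0 : Int)
    let headmark := (headlevel.foldl pvMarkStep ([], headcounter)).1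
    let endmark := (endlevel.foldl pvMarkStep ([], endcounter)).1
    (file.foldl (pvEmitA headmark endmark) ("", 0, 0, 0)).1

-- ===== PORT B =====
-- B's _invert helper; Python raises ValueError where the final else returns cond unchanged (outside Pre_)
def pvInvert (cond : String) : String :=
  if PySem.Str.isIn "<" cond then pvReplace1 cond "<" ">="
  else if PySem.Str.isIn ">=" cond then pvReplace1 cond ">=" "<"
  else if PySem.Str.isIn "==" cond then pvReplace1 cond "==" "!="
  else if PySem.Str.isIn "!=" cond then pvReplace1 cond "!=" "=="
  else cond

-- B's loop body: state (out, stack, counter, seen_while)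
def pvStepB (st : List String × List String × PySem.Dict Int Int × Bool) (line : String) :
    List String × List String × PySem.Dict Int Int × Bool :=
  match st with
  | (out, stack, counter, seen) =>
    if line = "" then (out ++ ["\n"], stack, counter, seen) else
    let w := pvTok line
    if w = "while" then
      let level : Int := stack.length
      let label := pvLabel level (PySem.Dict.getD counter level 0)
      let counter := counter.insert level (PySem.Dict.getD counter level 0 + 1)
      let body := pvInvert (pvReplace1 line "while " "")
      let body := pvReplace1 body "," (" goto end" ++ label)
      -- (assert 'goto' in body: holds under Pre_)
      (out ++ [("start" ++ label ++ ":\n" ++ body) ++ "\n"], stack ++ [label], counter, true)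
    else if w = "endwhile" then
      match stack.getLast? with
      | none => (out, stack, counter, seen)  -- Python raises IndexError (pop from empty list); outside Pre_
      | some label =>
        (out ++ [("x0 == x0 goto start" ++ label ++ "\n" ++
                  pvReplace1 line "endwhile" ("end" ++ label ++ ":")) ++ "\n"],
         stack.dropLast, counter, seen)
    else (out ++ [line ++ "\n"], stack, counter, seen)

def while2macro_alt (text : String) : String :=
  match ((PySem.Str.split? text "\n").getD []).foldl pvStepB ([], [], PySem.Dict.empty, false) with
  | (out, _, _, seen) => if seen = false then text else PySem.Str.join "" out

-- ===== PRECONDITION & SPEC =====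
-- Pre_ excludes: lines that are whitespace-only (A: IndexError), while-lines without a comparator
-- (A: TypeError) or without a comma/goto (A: AssertionError), unbalanced while/endwhile (A:
-- AssertionError), and balanced but ill-nested input (an endwhile before its while), where A either
-- raises IndexError or returns accidental negative-index-wraparound labels while B's stack pop raises.
def pvLineEv (l : String) : Option Bool :=
  if l = "" then none
  else if pvTok l = "while" then some true
  else if pvTok l = "endwhile" then some false
  else none

def pvEvents (file : List String) : List Bool := file.filterMap pvLineEv

-- depth automaton: true opens a loop, false closes one; never below 0, ends at 0
def pvNested : List Bool → Int → Bool
  | [], d => d == 0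
  | true :: es, d => pvNested es (d + 1)
  | false :: es, d => decide (0 < d) && pvNested es (d - 1)

def Pre_while2macro (text : String) : Prop :=
  let file := (PySem.Str.split? text "\n").getD []
  (∀ l ∈ file, l ≠ "" → PySem.Str.split₀ l ≠ []) ∧
  pvNested (pvEvents file) 0 = true ∧
  (∀ l ∈ file, l ≠ "" → (PySem.Str.split₀ l).headD "" = "while" →
    (PySem.Str.isIn "<" (pvReplace1 l "while " "") = true ∨
     PySem.Str.isIn ">=" (pvReplace1 l "while " "") = true ∨
     PySem.Str.isIn "==" (pvReplace1 l "while " "") = true ∨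
     PySem.Str.isIn "!=" (pvReplace1 l "while " "") = true) ∧
    (PySem.Str.isIn "," (pvReplace1 l "while " "") = true ∨
     PySem.Str.isIn "goto" (pvReplace1 l "while " "") = true))

instance (text : String) : Decidable (Pre_while2macro text) := by
  unfold Pre_while2macro; infer_instance

def pvWitness_while2macro : String := "while x1 < x2, x3\nadd x1 x1 x4\nendwhile"

def Spec_while2macro (text : String) (out : String) : Prop := out = while2macro_alt text
instance (text : String) (out : String) : Decidable (Spec_while2macro text out) := by
  unfold Spec_while2macro; infer_instance

-- ===== CLAIM (what is proved, stated in full; the proofs are below) =====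
def Claim_equal_while2macro : Prop :=
  ∀ (text : String), Dom_while2macro text → Pre_while2macro text →
    Spec_while2macro text (while2macro text)

-- ===== LEMMAS AND PROOFS =====

-- the (headlevel, endlevel) lists produced by A's first loop, from the while/endwhile event list
def pvLevels : List Bool → Int → List Int × List Int
  | [], _ => ([], [])
  | true :: es, d => ((pvLevels es (d + 1)).1.cons d, (pvLevels es (d + 1)).2)
  | false :: es, d => ((pvLevels es (d - 1)).1, (pvLevels es (d - 1)).2.cons (d - 1))

lemma pvScanA_spec (file : List String) : ∀ (ht et : Int) (hl el : List Int),
    file.foldl pvScanA (ht, et, hl, el)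
      = (ht + ((file.filterMap pvLineEv).count true : Int),
         et + ((file.filterMap pvLineEv).count false : Int),
         hl ++ (pvLevels (file.filterMap pvLineEv) (ht - et)).1,
         el ++ (pvLevels (file.filterMap pvLineEv) (ht - et)).2) := by
  induction file with
  | nil => intro ht et hl el; simp [pvLevels]
  | cons line rest ih =>
    intro ht et hl el
    by_cases h0 : line = ""
    · have hev : pvLineEv line = none := by simp [pvLineEv, h0]
      simp only [List.foldl_cons, List.filterMap_cons, hev]
      simp only [pvScanA, h0, if_true, reduceIte]
      exact ih ht et hl el
    · by_cases hw : pvTok line = "while"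
      · have hne : pvTok line ≠ "endwhile" := by rw [hw]; decide
        have hev : pvLineEv line = some true := by simp [pvLineEv, h0, hw]
        simp only [List.foldl_cons, List.filterMap_cons, hev]
        simp only [pvScanA, h0, hw, hne, if_true, if_false, reduceIte, if_neg, ite_true, ite_false]
        rw [ih]
        have hp : ht + 1 - et = ht - et + 1 := by omega
        simp [hp, pvLevels, List.count_cons, List.append_assoc, Prod.mk.injEq]
        push_cast
        omega
      · by_cases he : pvTok line = "endwhile"
        · have hev : pvLineEv line = some false := by simp [pvLineEv, h0, hw, he]
          simp only [List.foldl_cons, List.filterMap_cons, hev]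
          simp only [pvScanA, h0, hw, he, if_true, if_false, reduceIte, if_neg, ite_true, ite_false]
          rw [ih]
          have hp : ht - (et + 1) = ht - et - 1 := by omega
          simp [hp, pvLevels, List.count_cons, List.append_assoc, Prod.mk.injEq]
          push_cast
          omega
        · have hev : pvLineEv line = none := by simp [pvLineEv, h0, hw, he]
          simp only [List.foldl_cons, List.filterMap_cons, hev]
          simp only [pvScanA, h0, hw, he, if_false, reduceIte, if_neg, ite_false]
          exact ih ht et hl el


lemma pvNested_balance : ∀ (es : List Bool) (d : Int), pvNested es d = true →
    d + (es.count true : Int) = (es.count false : Int) := by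
  intro es
  induction es with
  | nil => intro d h; simp [pvNested] at h; simp [h]
  | cons e es ih =>
    intro d h
    cases e <;> simp [pvNested] at h <;> simp [List.count_cons]
    · have := ih _ h.2; omega
    · have := ih _ h; omega

lemma pvLevels_len_fst : ∀ (es : List Bool) (d : Int), (pvLevels es d).1.length = es.count true := by
  intro es
  induction es with
  | nil => intro d; simp [pvLevels]
  | cons e es ih => intro d; cases e <;> simp [pvLevels, List.count_cons, ih]

lemma pvLevels_len_snd : ∀ (es : List Bool) (d : Int), (pvLevels es d).2.length = es.count false := by
  intro es
  induction es with
  | nil => intro d; simp [pvLevels]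
  | cons e es ih => intro d; cases e <;> simp [pvLevels, List.count_cons, ih]

lemma pvLevels_nonneg : ∀ (es : List Bool) (d : Int), pvNested es d = true → 0 ≤ d →
    (∀ x ∈ (pvLevels es d).1, 0 ≤ x) ∧ (∀ x ∈ (pvLevels es d).2, 0 ≤ x) := by
  intro es
  induction es with
  | nil => intro d _ _; simp [pvLevels]
  | cons e es ih =>
    intro d h hd
    cases e with
    | false =>
      simp only [pvNested, Bool.and_eq_true, decide_eq_true_eq] at h
      have := ih _ h.2 (by omega)
      simp only [pvLevels]
      refine ⟨this.1, fun x hx => ?_⟩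
      rcases List.mem_cons.mp (by simpa using hx) with hx | hx
      · omega
      · exact this.2 x hx
    | true =>
      simp only [pvNested] at h
      have := ih _ h (by omega)
      simp only [pvLevels]
      refine ⟨fun x hx => ?_, this.2⟩
      rcases List.mem_cons.mp (by simpa using hx) with hx | hx
      · omega
      · exact this.1 x hx

lemma pvMark_append : ∀ (xs : List Int) (acc : List String) (cnt : List Int),
    xs.foldl pvMarkStep (acc, cnt) =
      (acc ++ (xs.foldl pvMarkStep ([], cnt)).1, (xs.foldl pvMarkStep ([], cnt)).2) := by
  intro xs
  induction xs with
  | nil => intro acc cnt; simp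
  | cons x xs ih =>
    intro acc cnt
    simp only [List.foldl_cons, pvMarkStep]
    rw [ih, ih (([] : List String) ++ _)]
    simp

lemma pvMark_len : ∀ (xs : List Int) (cnt : List Int),
    (xs.foldl pvMarkStep ([], cnt)).1.length = xs.length := by
  intro xs
  induction xs with
  | nil => intro cnt; simp
  | cons x xs ih =>
    intro cnt
    simp only [List.foldl_cons, pvMarkStep]
    rw [pvMark_append]
    simp [ih]

lemma pvMark_get : ∀ (xs : List Int) (cnt : List Int),
    (∀ x ∈ xs, 0 ≤ x ∧ x < (cnt.length : Int)) →
    ∀ (k : Nat) (hk : k < xs.length),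
      (xs.foldl pvMarkStep ([], cnt)).1[k]? =
        some (pvLabel xs[k] (PySem.List.pyGetD cnt xs[k] 0 + ((xs.take k).count xs[k] : Int))) := by
  intro xs
  induction xs with
  | nil => intro cnt h k hk; simp at hk
  | cons x xs ih =>
    intro cnt h k hk
    simp only [List.foldl_cons, pvMarkStep, List.nil_append]
    rw [pvMark_append]
    cases k with
    | zero => simp
    | succ k =>
      have hx := h x (List.mem_cons_self)
      have hk' : k < xs.length := by simpa using hk
      have h' : ∀ y ∈ xs, 0 ≤ y ∧
          y < ((PySem.List.pySetD cnt x (PySem.List.pyGetD cnt x 0 + 1)).length : Int) := by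
        intro y hy
        rw [PySem.List.length_pySetD]
        exact h y (List.mem_cons_of_mem _ hy)
      rw [List.getElem?_append_right (by simp)]
      simp only [List.length_singleton, Nat.add_sub_cancel]
      rw [ih _ h' k hk']
      have hy := h xs[k] (List.mem_cons_of_mem _ (List.getElem_mem hk'))
      have hxe : (x : Int) = ((x.toNat : Nat) : Int) := by omega
      have hye : (xs[k] : Int) = ((xs[k].toNat : Nat) : Int) := by omega
      have hxl : x.toNat < cnt.length := by omega
      have hget : PySem.List.pyGetD (PySem.List.pySetD cnt x (PySem.List.pyGetD cnt x 0 + 1))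
          xs[k] 0 = if xs[k] = x then PySem.List.pyGetD cnt x 0 + 1
                    else PySem.List.pyGetD cnt xs[k] 0 := by
        rw [hxe, hye, PySem.List.pyGetD_pySetD_natCast cnt x.toNat xs[k].toNat _ _ hxl]
        by_cases hyx : xs[k] = x
        · simp [hyx]
        · rw [if_neg (by omega), if_neg (by rw [← hxe, ← hye]; exact hyx)]
      simp only [List.getElem_cons_succ, List.take_succ_cons, List.count_cons, hget]
      by_cases hyx : xs[k] = x
      · rw [if_pos hyx, if_pos (by simp [hyx])]
        rw [hyx]
        push_cast
        ring_nf
      · rw [if_neg hyx, if_neg (by simpa using Ne.symm hyx)]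
        push_cast
        ring_nf

lemma pvJoin_append (out : List String) (p : String) :
    PySem.Str.join "" (out ++ [p]) = PySem.Str.join "" out ++ p := by
  have key : ∀ (ps : List (List Char)) (q : List Char),
      PySem.Chars.join [] (ps ++ [q]) = PySem.Chars.join [] ps ++ q := by
    intro ps q
    induction ps with
    | nil => simp [PySem.Chars.join, List.intercalate]
    | cons a ps ih =>
      cases ps with
      | nil => simp [PySem.Chars.join, List.intercalate, List.intersperse]
      | cons b ps =>
        simp only [PySem.Chars.join, List.intercalate, List.cons_append, List.intersperse,
          List.flatten_cons] at *
        simp [ih, List.append_assoc]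
  apply String.toList_inj.mp
  simp only [PySem.Str.toList_join, String.toList_append, List.map_append, List.map_cons,
    List.map_nil]
  simpa using key (out.map String.toList) p.toList

lemma pvStepB_seen : ∀ (rest : List String) (st : List String × List String × PySem.Dict Int Int × Bool),
    (rest.foldl pvStepB st).2.2.2
      = (st.2.2.2 || decide ((rest.filterMap pvLineEv).count true ≠ 0)) := by
  intro rest
  induction rest with
  | nil => intro st; simp
  | cons line rest ih =>
    intro st
    obtain ⟨out, stack, counter, seen⟩ := st
    by_cases h0 : line = ""
    · have hev : pvLineEv line = none := by simp [pvLineEv, h0]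
      simp only [List.foldl_cons, List.filterMap_cons, hev]
      simp only [pvStepB, h0, if_true, reduceIte]
      exact ih _
    · by_cases hw : pvTok line = "while"
      · have hev : pvLineEv line = some true := by simp [pvLineEv, h0, hw]
        simp only [List.foldl_cons, List.filterMap_cons, hev]
        simp only [pvStepB, h0, hw, if_true, if_false, reduceIte, ite_true, ite_false]
        rw [ih _]
        simp [List.count_cons]
      · by_cases he : pvTok line = "endwhile"
        · have hev : pvLineEv line = some false := by simp [pvLineEv, h0, hw, he]
          simp only [List.foldl_cons, List.filterMap_cons, hev]
          simp only [pvStepB, h0, hw, he, if_true, if_false, reduceIte, ite_true, ite_false]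
          cases hl : stack.getLast? with
          | none => rw [ih _]; simp [List.count_cons]
          | some label => rw [ih _]; simp [List.count_cons]
        · have hev : pvLineEv line = none := by simp [pvLineEv, h0, hw, he]
          simp only [List.foldl_cons, List.filterMap_cons, hev]
          simp only [pvStepB, h0, hw, he, if_false, reduceIte, ite_false]
          exact ih _

lemma pvEmit_agree (headmark endmark : List String) (hl el : List Int)
    (Hh : ∀ (k : Nat) (hk : k < hl.length),
      headmark[k]? = some (pvLabel hl[k] (((hl.take k).count hl[k] : Int))))
    (He : ∀ (k : Nat) (hk : k < el.length),
      endmark[k]? = some (pvLabel el[k] (((el.take k).count el[k] : Int))))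
    (Hhlen : headmark.length = hl.length) (Helen : endmark.length = el.length) :
    ∀ (rest : List String) (hlD elD : List Int) (stack : List String)
      (counter : PySem.Dict Int Int) (out : List String) (lid : Int) (seen : Bool),
      pvNested (rest.filterMap pvLineEv) stack.length = true →
      hl = hlD ++ (pvLevels (rest.filterMap pvLineEv) stack.length).1 →
      el = elD ++ (pvLevels (rest.filterMap pvLineEv) stack.length).2 →
      (∀ j : Int, PySem.Dict.getD counter j 0 = (hlD.count j : Int)) →
      (∀ (j : Nat), j < stack.length → stack[j]? = some (pvLabel j ((hlD.count (j : Int) : Int) - 1))) →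
      (∀ j : Int, 0 ≤ j →
        (elD.count j : Int) =
          if j < (stack.length : Int) then (hlD.count j : Int) - 1 else (hlD.count j : Int)) →
      (rest.foldl (pvEmitA headmark endmark)
          (PySem.Str.join "" out, (hlD.length : Int), (elD.length : Int), lid)).1
        = PySem.Str.join "" (rest.foldl pvStepB (out, stack, counter, seen)).1 := by
  intro rest
  induction rest with
  | nil => intro hlD elD stack counter out lid seen _ _ _ _ _ _; simp
  | cons line rest ih =>
    intro hlD elD stack counter out lid seen hnest hhl hel hcnt hstk helc
    by_cases h0 : line = ""
    · have hev : pvLineEv line = none := by simp [pvLineEv, h0]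
      rw [List.filterMap_cons, hev] at hnest hhl hel
      have hA : pvEmitA headmark endmark
          (PySem.Str.join "" out, (hlD.length : Int), (elD.length : Int), lid) line
          = (PySem.Str.join "" (out ++ ["\n"]), (hlD.length : Int), (elD.length : Int), lid) := by
        simp [pvEmitA, h0, pvJoin_append]
      have hB : pvStepB (out, stack, counter, seen) line = (out ++ ["\n"], stack, counter, seen) := by
        simp [pvStepB, h0]
      simp only [List.foldl_cons, hA, hB]
      exact ih hlD elD stack counter (out ++ ["\n"]) lid seen hnest hhl hel hcnt hstk helc
    · by_cases hw : pvTok line = "while"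
      · have hev : pvLineEv line = some true := by simp [pvLineEv, h0, hw]
        have hne : pvTok line ≠ "endwhile" := by rw [hw]; decide
        rw [List.filterMap_cons, hev] at hnest hhl hel
        simp only [pvLevels] at hhl hel
        simp only [pvNested] at hnest
        have hklt : hlD.length < hl.length := by rw [hhl]; simp
        have hlat : hl[hlD.length]'hklt = (stack.length : Int) := by
          have h1 : hl[hlD.length]? = some (stack.length : Int) := by
            rw [hhl, List.getElem?_append_right (le_refl hlD.length)]
            simp
          have h2 : hl[hlD.length]? = some (hl[hlD.length]'hklt) := List.getElem?_eq_getElem hklt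
          rw [h1] at h2
          exact (Option.some.inj h2).symm
        have htake : hl.take hlD.length = hlD := by rw [hhl]; exact List.take_left
        have hmark : PySem.List.pyGetD headmark (hlD.length : Int) ""
            = pvLabel (stack.length : Int) ((hlD.count ((stack.length : Int)) : Int)) := by
          rw [PySem.List.pyGetD_natCast, List.getD_eq_getElem?_getD, Hh hlD.length hklt]
          simp [hlat, htake]
        have hlabel : PySem.Dict.getD counter (stack.length : Int) 0
            = (hlD.count ((stack.length : Int)) : Int) := hcnt _
        have hA : pvEmitA headmark endmark
            (PySem.Str.join "" out, (hlD.length : Int), (elD.length : Int), lid) line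
            = (PySem.Str.join "" (out ++
                [("start" ++ pvLabel (stack.length : Int) ((hlD.count ((stack.length : Int)) : Int))
                    ++ ":\n" ++
                  pvReplace1 (pvInvert (pvReplace1 line "while " "")) ","
                    (" goto end" ++ pvLabel (stack.length : Int)
                      ((hlD.count ((stack.length : Int)) : Int)))) ++ "\n"]),
               ((hlD ++ [(stack.length : Int)]).length : Int), (elD.length : Int), lid + 1) := by
          simp only [pvEmitA, h0, hw, hne, if_true, if_false, reduceIte, ite_true, ite_false,
            if_neg, hmark, pvInvert, pvJoin_append, Prod.mk.injEq, String.reduceEq]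
          refine ⟨by simp [String.append_assoc], by simp⟩
        have hB : pvStepB (out, stack, counter, seen) line
            = (out ++
                [("start" ++ pvLabel (stack.length : Int) ((hlD.count ((stack.length : Int)) : Int))
                    ++ ":\n" ++
                  pvReplace1 (pvInvert (pvReplace1 line "while " "")) ","
                    (" goto end" ++ pvLabel (stack.length : Int)
                      ((hlD.count ((stack.length : Int)) : Int)))) ++ "\n"],
               stack ++ [pvLabel (stack.length : Int) ((hlD.count ((stack.length : Int)) : Int))],
               counter.insert (stack.length : Int)
                 ((hlD.count ((stack.length : Int)) : Int) + 1), true) := by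
          simp only [pvStepB, h0, hw, if_true, if_false, reduceIte, ite_true, ite_false, hlabel,
            Prod.mk.injEq, String.reduceEq]
        simp only [List.foldl_cons, hA, hB]
        apply ih (hlD ++ [(stack.length : Int)]) elD
          (stack ++ [pvLabel (stack.length : Int) ((hlD.count ((stack.length : Int)) : Int))])
          (counter.insert (stack.length : Int) ((hlD.count ((stack.length : Int)) : Int) + 1))
          _ (lid + 1) true
        · simpa using hnest
        · rw [hhl]; simp [List.append_assoc]
        · rw [hel]; simp
        · intro j
          rw [PySem.Dict.getD_insert]
          by_cases hj : j = (stack.length : Int)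
          · rw [if_pos hj, hj, List.count_append, List.count_singleton, if_pos (by simp)]
            push_cast; omega
          · rw [if_neg hj, List.count_append, List.count_singleton,
              if_neg (by simpa using Ne.symm hj), hcnt j]
            push_cast; omega
        · intro j hj
          rcases Nat.lt_succ_iff_lt_or_eq.mp (by simpa using hj) with hj' | hj'
          · rw [List.getElem?_append_left hj', hstk j hj']
            congr 2
            rw [List.count_append, List.count_singleton,
              if_neg (by simp only [beq_iff_eq, Int.natCast_inj]; omega)]
            push_cast; omega
          · subst hj'
            rw [List.getElem?_append_right (le_refl _)]
            simp only [Nat.sub_self, List.getElem?_cons_zero]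
            congr 2
            rw [List.count_append, List.count_singleton, if_pos (by simp)]
            push_cast; omega
        · intro j hj0
          have hold := helc j hj0
          simp only [List.length_append, List.length_cons, List.length_nil]
          by_cases hjd : j = (stack.length : Int)
          · subst hjd
            rw [if_neg (by omega)] at hold
            rw [if_pos (show ((stack.length : Nat) : Int) < ((stack.length + 1 : Nat) : Int) by
                push_cast; omega),
              List.count_append, List.count_singleton,
              if_pos (show ((((stack.length : Nat) : Int)) == ((stack.length : Nat) : Int)) = true by
                simp)]
            push_cast at hold ⊢; omega
          · rw [List.count_append, List.count_singleton,
              if_neg (show ¬ ((((stack.length : Nat) : Int) == j) = true) by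
                simp only [beq_iff_eq]; omega)]
            by_cases hlt : j < (stack.length : Int)
            · rw [if_pos hlt] at hold
              rw [if_pos (show j < ((stack.length + 1 : Nat) : Int) by push_cast; omega)]
              push_cast at hold ⊢; omega
            · rw [if_neg hlt] at hold
              rw [if_neg (show ¬ (j < ((stack.length + 1 : Nat) : Int)) by push_cast; omega)]
              push_cast at hold ⊢; omega
      · by_cases he : pvTok line = "endwhile"
        · have hev : pvLineEv line = some false := by simp [pvLineEv, h0, hw, he]
          rw [List.filterMap_cons, hev] at hnest hhl hel
          simp only [pvLevels] at hhl hel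
          simp only [pvNested, Bool.and_eq_true, decide_eq_true_eq] at hnest
          obtain ⟨hdpos, hnest'⟩ := hnest
          have hdpos' : 0 < stack.length := by exact_mod_cast hdpos
          have hc1 : ((stack.length - 1 : Nat) : Int) = (stack.length : Int) - 1 := by
            push_cast [Nat.cast_sub hdpos']; ring
          have hklt : elD.length < el.length := by rw [hel]; simp
          have helat : el[elD.length]'hklt = (stack.length : Int) - 1 := by
            have h1 : el[elD.length]? = some ((stack.length : Int) - 1) := by
              rw [hel, List.getElem?_append_right (le_refl elD.length)]
              simp
            have h2 : el[elD.length]? = some (el[elD.length]'hklt) := List.getElem?_eq_getElem hklt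
            rw [h1] at h2
            exact (Option.some.inj h2).symm
          have htake : el.take elD.length = elD := by rw [hel]; exact List.take_left
          have hcountm : (elD.count ((stack.length : Int) - 1) : Int)
              = (hlD.count ((stack.length : Int) - 1) : Int) - 1 := by
            have := helc ((stack.length : Int) - 1) (by omega)
            rw [if_pos (by omega)] at this
            exact this
          have hmark : PySem.List.pyGetD endmark (elD.length : Int) ""
              = pvLabel ((stack.length : Int) - 1)
                  ((hlD.count ((stack.length : Int) - 1) : Int) - 1) := by
            rw [PySem.List.pyGetD_natCast, List.getD_eq_getElem?_getD, He elD.length hklt]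
            simp [helat, htake, hcountm]
          have hlast : stack.getLast? = some (pvLabel ((stack.length : Int) - 1)
              ((hlD.count ((stack.length : Int) - 1) : Int) - 1)) := by
            rw [List.getLast?_eq_getElem?, hstk (stack.length - 1) (by omega), hc1]
          have hA : pvEmitA headmark endmark
              (PySem.Str.join "" out, (hlD.length : Int), (elD.length : Int), lid) line
              = (PySem.Str.join "" (out ++
                  [("x0 == x0 goto start" ++ pvLabel ((stack.length : Int) - 1)
                      ((hlD.count ((stack.length : Int) - 1) : Int) - 1) ++ "\n" ++
                    pvReplace1 line "endwhile" ("end" ++ pvLabel ((stack.length : Int) - 1)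
                      ((hlD.count ((stack.length : Int) - 1) : Int) - 1) ++ ":")) ++ "\n"]),
                 (hlD.length : Int), ((elD ++ [(stack.length : Int) - 1]).length : Int),
                 lid + 1) := by
            simp only [pvEmitA, h0, hw, he, if_true, if_false, reduceIte, ite_true, ite_false,
              if_neg, hmark, pvJoin_append, Prod.mk.injEq, String.reduceEq]
            refine ⟨by simp [String.append_assoc], by simp⟩
          have hB : pvStepB (out, stack, counter, seen) line
              = (out ++
                  [("x0 == x0 goto start" ++ pvLabel ((stack.length : Int) - 1)
                      ((hlD.count ((stack.length : Int) - 1) : Int) - 1) ++ "\n" ++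
                    pvReplace1 line "endwhile" ("end" ++ pvLabel ((stack.length : Int) - 1)
                      ((hlD.count ((stack.length : Int) - 1) : Int) - 1) ++ ":")) ++ "\n"],
                 stack.dropLast, counter, seen) := by
            simp only [pvStepB, h0, hw, he, if_true, if_false, reduceIte, ite_true, ite_false,
              hlast, Prod.mk.injEq, String.reduceEq]
          simp only [List.foldl_cons, hA, hB]
          have hdl : ((stack.dropLast.length : Nat) : Int) = (stack.length : Int) - 1 := by
            rw [List.length_dropLast, hc1]
          apply ih hlD (elD ++ [(stack.length : Int) - 1]) stack.dropLast counter _ (lid + 1) seen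
          · rw [hdl]; exact hnest'
          · rw [hdl]; exact hhl
          · rw [hdl, List.append_assoc, List.singleton_append]; exact hel
          · exact hcnt
          · intro j hj
            rw [List.length_dropLast] at hj
            rw [List.getElem?_dropLast, if_pos hj, hstk j (by omega)]
          · intro j hj0
            rw [List.count_append, List.count_singleton]
            have hold := helc j hj0
            rw [hdl]
            by_cases hjd : j = (stack.length : Int) - 1
            · rw [if_pos (by simp [hjd]), if_neg (by omega)]
              rw [if_pos (by omega)] at hold
              push_cast at hold ⊢; omega
            · rw [if_neg (by simpa using Ne.symm hjd)]
              by_cases hlt : j < (stack.length : Int) - 1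
              · rw [if_pos (by omega)] at hold
                rw [if_pos (by omega)]
                push_cast at hold ⊢; omega
              · rw [if_neg (by omega)] at hold
                rw [if_neg (by omega)]
                push_cast at hold ⊢; omega
        · have hev : pvLineEv line = none := by simp [pvLineEv, h0, hw, he]
          rw [List.filterMap_cons, hev] at hnest hhl hel
          have hA : pvEmitA headmark endmark
              (PySem.Str.join "" out, (hlD.length : Int), (elD.length : Int), lid) line
              = (PySem.Str.join "" (out ++ [line ++ "\n"]), (hlD.length : Int),
                 (elD.length : Int), lid + 1) := by
            simp [pvEmitA, h0, hw, he, pvJoin_append, String.append_assoc]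
          have hB : pvStepB (out, stack, counter, seen) line
              = (out ++ [line ++ "\n"], stack, counter, seen) := by
            simp [pvStepB, h0, hw, he]
          simp only [List.foldl_cons, hA, hB]
          exact ih hlD elD stack counter (out ++ [line ++ "\n"]) (lid + 1) seen
            hnest hhl hel hcnt hstk helc

-- ===== VERDICT (by name: the statement is the Claim_ definition above) =====
theorem while2macro_spec : Claim_equal_while2macro := by
  intro text _ hpre
  unfold Spec_while2macro
  simp only [Pre_while2macro, pvEvents] at hpre
  obtain ⟨-, hnest, -⟩ := hpre
  simp only [while2macro, while2macro_alt]
  generalize hF : (PySem.Str.split? text "\n").getD [] = file at hnest ⊢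
  have hscan : file.foldl pvScanA (0, 0, [], []) =
      (((file.filterMap pvLineEv).count true : Int),
       ((file.filterMap pvLineEv).count false : Int),
       (pvLevels (file.filterMap pvLineEv) 0).1, (pvLevels (file.filterMap pvLineEv) 0).2) := by
    simpa using pvScanA_spec file 0 0 [] []
  have hbal0 := pvNested_balance (file.filterMap pvLineEv) 0 hnest
  rw [hscan]
  dsimp only
  rw [if_neg (show ¬ (((file.filterMap pvLineEv).count true : Int) ≠
      ((file.filterMap pvLineEv).count false : Int)) from not_not_intro (by omega))]
  rcases hfold : file.foldl pvStepB ([], [], PySem.Dict.empty, false) with ⟨out, st2, c2, sn2⟩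
  have hseen := pvStepB_seen file ([], [], PySem.Dict.empty, false)
  rw [hfold] at hseen
  simp only at hseen
  by_cases hz : (file.filterMap pvLineEv).count true = 0
  · rw [if_pos (by exact_mod_cast hz)]
    have hsn : sn2 = false := by rw [hseen]; simp [hz]
    rw [hsn]
    simp
  · rw [if_neg (by exact_mod_cast hz)]
    have hsn : sn2 = true := by rw [hseen]; simp [hz]
    rw [hsn]
    simp only [Bool.true_eq_false, if_neg, reduceIte]
    -- abbreviations
    have hnn := pvLevels_nonneg (file.filterMap pvLineEv) 0 hnest (le_refl 0)
    have hlenf := pvLevels_len_fst (file.filterMap pvLineEv) 0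
    have hlens := pvLevels_len_snd (file.filterMap pvLineEv) 0
    have hlne : (pvLevels (file.filterMap pvLineEv) 0).1 ≠ [] := by
      intro hcon
      rw [← List.length_eq_zero_iff, hlenf] at hcon
      exact hz hcon
    have helne : (pvLevels (file.filterMap pvLineEv) 0).2 ≠ [] := by
      intro hcon
      rw [← List.length_eq_zero_iff, hlens] at hcon
      omega
    obtain ⟨M, hM⟩ : ∃ m, PySem.List.max? (pvLevels (file.filterMap pvLineEv) 0).1 id = some m := by
      cases h : PySem.List.max? (pvLevels (file.filterMap pvLineEv) 0).1 id with
      | none => exact absurd ((PySem.List.max?_eq_none_iff _ _).mp h) hlne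
      | some m => exact ⟨m, rfl⟩
    obtain ⟨N, hN⟩ : ∃ m, PySem.List.max? (pvLevels (file.filterMap pvLineEv) 0).2 id = some m := by
      cases h : PySem.List.max? (pvLevels (file.filterMap pvLineEv) 0).2 id with
      | none => exact absurd ((PySem.List.max?_eq_none_iff _ _).mp h) helne
      | some m => exact ⟨m, rfl⟩
    rw [hM, hN]
    simp only [Option.getD_some]
    have hM0 : 0 ≤ M := hnn.1 M (PySem.List.max?_mem hM)
    have hN0 : 0 ≤ N := hnn.2 N (PySem.List.max?_mem hN)
    have hboundh : ∀ x ∈ (pvLevels (file.filterMap pvLineEv) 0).1,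
        0 ≤ x ∧ x < ((List.replicate (M + 1).toNat (0 : Int)).length : Int) := by
      intro x hx
      have hle : x ≤ M := by simpa using PySem.List.max?_isMax hM x hx
      refine ⟨hnn.1 x hx, ?_⟩
      rw [List.length_replicate]
      omega
    have hbounde : ∀ x ∈ (pvLevels (file.filterMap pvLineEv) 0).2,
        0 ≤ x ∧ x < ((List.replicate (N + 1).toNat (0 : Int)).length : Int) := by
      intro x hx
      have hle : x ≤ N := by simpa using PySem.List.max?_isMax hN x hx
      refine ⟨hnn.2 x hx, ?_⟩
      rw [List.length_replicate]
      omega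
    have hzget : ∀ (cntlen : Nat) (x : Int), 0 ≤ x → x < (cntlen : Int) →
        PySem.List.pyGetD (List.replicate cntlen (0 : Int)) x 0 = 0 := by
      intro cntlen x hx0 hxl
      have hlenx : x < (((List.replicate cntlen (0 : Int)).length : Nat) : Int) := by
        rw [List.length_replicate]; exact hxl
      rw [PySem.List.pyGetD_eq_getElem _ _ hx0 hlenx]
      exact List.getElem_replicate _
    have Hh : ∀ (k : Nat) (hk : k < (pvLevels (file.filterMap pvLineEv) 0).1.length),
        ((pvLevels (file.filterMap pvLineEv) 0).1.foldl pvMarkStep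
          ([], List.replicate (M + 1).toNat (0 : Int))).1[k]? =
          some (pvLabel (pvLevels (file.filterMap pvLineEv) 0).1[k]
            ((((pvLevels (file.filterMap pvLineEv) 0).1.take k).count
              (pvLevels (file.filterMap pvLineEv) 0).1[k] : Int))) := by
      intro k hk
      rw [pvMark_get _ _ hboundh k hk]
      have hx := hboundh _ (List.getElem_mem hk)
      rw [hzget _ _ hx.1 (by simpa using hx.2), zero_add]
    have He : ∀ (k : Nat) (hk : k < (pvLevels (file.filterMap pvLineEv) 0).2.length),
        ((pvLevels (file.filterMap pvLineEv) 0).2.foldl pvMarkStep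
          ([], List.replicate (N + 1).toNat (0 : Int))).1[k]? =
          some (pvLabel (pvLevels (file.filterMap pvLineEv) 0).2[k]
            ((((pvLevels (file.filterMap pvLineEv) 0).2.take k).count
              (pvLevels (file.filterMap pvLineEv) 0).2[k] : Int))) := by
      intro k hk
      rw [pvMark_get _ _ hbounde k hk]
      have hx := hbounde _ (List.getElem_mem hk)
      rw [hzget _ _ hx.1 (by simpa using hx.2), zero_add]
    have hjoinnil : PySem.Str.join "" ([] : List String) = "" := by
      apply String.toList_inj.mp
      simp [PySem.Str.toList_join, PySem.Chars.join_nil]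
    have key := pvEmit_agree _ _ _ _ Hh He
      (pvMark_len _ _) (pvMark_len _ _) file [] [] [] PySem.Dict.empty [] 0 false
      (by simpa using hnest)
      (by simp)
      (by simp)
      (by intro j; simp [PySem.Dict.getD_empty])
      (by intro j hj; simp at hj)
      (by intro j hj; simp [hj])
    rw [hjoinnil] at key
    simp only [List.length_nil, Nat.cast_zero] at key
    rw [key, hfold]
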